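-- pv_equiv track=rewrite | github.com/innotommy/OAuthpaper-code | idps-identification.py | get_login_url
-- ===== SOURCE A (Python) =====
-- def get_login_url(urls):
--     """
--     Return the login url from the list of urls (if present).
--     """
--     for url in urls:
--         cleaned_url = url.replace('_', '').replace('-', '').replace('.', '').lower()
--         # logger.info(f'{bcolors.OKGREEN}[+]{bcolors.ENDC} {url}')
--
--         denylist = ['/hc/', 'facebook', 'google']
--
--         if '/signin' in cleaned_url or \
--             '/login' in cleaned_url and \
--             '/join'  in cleaned_url and  \
--             not any(i in cleaned_url for i in denylist):
--             # logger.info(f'Login url found: {bcolors.OKGREEN}{url}{bcolors.ENDC} because contains /login or /signin')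
--             return url
--
--     for url in urls:
--         cleaned_url = url.replace('_', '').replace('-', '').replace('.', '').lower()
--
--         if 'signin' in cleaned_url or \
--             'login' in cleaned_url and \
--             not any(i in cleaned_url for i in denylist):
--             # logger.info(f'Login url found: {bcolors.OKGREEN}{url}{bcolors.ENDC} because contains login or signin')
--             return url
--     return ''
-- ===== SOURCE B (Python) =====
-- def get_login_url(urls):
--     """
--     Return the login url from the list of urls (if present).
--     """
--     denylist = ['/hc/', 'facebook', 'google']
--     weak_candidate = None
--     for url in urls:
--         cleaned_url = url.replace('_', '').replace('-', '').replace('.', '').lower()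
--         if '/signin' in cleaned_url or \
--             '/login' in cleaned_url and \
--             '/join' in cleaned_url and \
--             not any(i in cleaned_url for i in denylist):
--             return url
--         if weak_candidate is None and (
--             'signin' in cleaned_url or
--             'login' in cleaned_url and
--             not any(i in cleaned_url for i in denylist)):
--             weak_candidate = url
--     return weak_candidate if weak_candidate is not None else ''
-- ===== Notes on version B (the rewrite author's own statement) =====
-- stated objective: faster
-- what changed: Replaces A's two full scans (each recleaning every url) with a single scan that returns the first strong match immediately and remembers the first weak match in an accumulator.
import Mathlib
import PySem

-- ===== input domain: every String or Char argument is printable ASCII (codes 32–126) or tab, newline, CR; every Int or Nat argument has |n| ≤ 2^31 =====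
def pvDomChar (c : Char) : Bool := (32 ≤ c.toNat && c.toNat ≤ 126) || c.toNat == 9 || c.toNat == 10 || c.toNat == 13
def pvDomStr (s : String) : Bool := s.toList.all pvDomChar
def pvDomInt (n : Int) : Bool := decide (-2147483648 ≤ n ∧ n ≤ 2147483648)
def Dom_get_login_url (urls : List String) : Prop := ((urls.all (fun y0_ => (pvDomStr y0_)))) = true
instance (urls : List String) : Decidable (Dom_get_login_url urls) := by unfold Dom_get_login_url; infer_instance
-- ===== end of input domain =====

-- B replaces A's two full scans with a single pass keeping a first-weak-match accumulator
-- (each url cleaned once instead of twice); return value unchanged.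

-- shared helpers (same expressions in both Pythons)
def pvClean (u : String) : String :=
  PySem.Str.lower (PySem.Str.replace (PySem.Str.replace (PySem.Str.replace u "_" "") "-" "") "." "")

def pvDenylist : List String := ["/hc/", "facebook", "google"]

def pvStrong (c : String) : Bool :=
  PySem.Str.isIn "/signin" c ||
    (PySem.Str.isIn "/login" c && PySem.Str.isIn "/join" c &&
      !(pvDenylist.any (fun i => PySem.Str.isIn i c)))

def pvWeak (c : String) : Bool :=
  PySem.Str.isIn "signin" c ||
    (PySem.Str.isIn "login" c &&
      !(pvDenylist.any (fun i => PySem.Str.isIn i c)))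

-- ===== PORT A =====
-- first for-loop: first url whose cleaned form satisfies the strong predicate
def pvLoopA1 : List String → Option String
  | [] => none
  | u :: t => if pvStrong (pvClean u) then some u else pvLoopA1 t

-- second for-loop: first url whose cleaned form satisfies the weak predicate
def pvLoopA2 : List String → Option String
  | [] => none
  | u :: t => if pvWeak (pvClean u) then some u else pvLoopA2 t

def get_login_url (urls : List String) : String :=
  match pvLoopA1 urls with
  | some u => u
  | none =>
    match pvLoopA2 urls with
    | some u => u
    | none => ""

-- ===== PORT B =====
-- single pass: return first strong match at once, remember the first weak match
def pvLoopB : List String → Option String → String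
  | [], acc => acc.getD ""
  | u :: t, acc =>
    let c := pvClean u
    if pvStrong c then u
    else pvLoopB t (if acc.isNone && pvWeak c then some u else acc)

def get_login_url_alt (urls : List String) : String := pvLoopB urls none

-- ===== PRECONDITION & SPEC =====
def Spec_get_login_url (urls : List String) (out : String) : Prop := out = get_login_url_alt urls
instance (urls : List String) (out : String) : Decidable (Spec_get_login_url urls out) := by unfold Spec_get_login_url; infer_instance

-- ===== CLAIM (what is proved, stated in full; the proofs are below) =====
def Claim_equal_get_login_url : Prop := ∀ (urls : List String), Dom_get_login_url urls → Spec_get_login_url urls (get_login_url urls)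

-- ===== LEMMAS AND PROOFS =====
lemma pvLoopB_eq (urls : List String) :
    ∀ acc : Option String,
      pvLoopB urls acc =
        match pvLoopA1 urls with
        | some u => u
        | none =>
          match acc with
          | some w => w
          | none => (pvLoopA2 urls).getD "" := by
  induction urls with
  | nil =>
    intro acc
    cases acc <;> simp [pvLoopB, pvLoopA1, pvLoopA2]
  | cons u t ih =>
    intro acc
    simp only [pvLoopB, pvLoopA1, pvLoopA2]
    by_cases hs : pvStrong (pvClean u)
    · simp [hs]
    · simp only [hs]
      rw [ih]
      cases acc with
      | some w => simp
      | none =>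
        by_cases hw : pvWeak (pvClean u) <;> simp [hw]

-- ===== VERDICT (by name: the statement is the Claim_ definition above) =====
theorem get_login_url_spec : Claim_equal_get_login_url := by
  intro urls _
  unfold Spec_get_login_url get_login_url get_login_url_alt
  rw [pvLoopB_eq]
  cases h1 : pvLoopA1 urls <;> cases h2 : pvLoopA2 urls <;> simp
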